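-- pv_equiv track=rewrite | github.com/zgwd666/-offer | 面试题13:机器人的运动范围/机器人的运动范围.py | wardrobeFinishing
-- ===== SOURCE A (Python) =====
-- def wardrobeFinishing(m: int, n: int, cnt: int) -> int:
--     visited=[[False for i in range(n)]for i in range(m)]#初始化标记数组
--     dir=[(0,1),(1,0)]#创建方向数组
--     def digit(x,y):#计算点位各个位置上的数字和
--         s=0
--         while x!=0:
--             s+=x%10
--             x=x//10
--         while y!=0:
--             s+=y%10
--             y=y//10
--         return s
--     def bfs(visited,i,j,cnt):#bfs函数，参数包括标记数组，点位坐标，cnt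
--         queue=[]#初始化队列
--         queue.append((i,j))#将当前点加入队列中
--         visited[i][j]=True#将当前点标记为True
--         res=1#初始化结果未1
--         while queue:#对队列进行遍历
--             curx,cury=queue.pop()#弹出队列最左侧的点
--             for dx,dy in dir:#对点的右侧和下侧点进行遍历
--                 nextx,nexty=curx+dx,cury+dy#计算下一个点
--                 if nextx<0 or nextx>=m or nexty<0 or nexty>=n or visited[nextx][nexty] or digit(nextx,nexty)>cnt:#如果下一个点超过边界或者下一个点已经遍历过或者下一个点的和大于目标值，直接跳过
--                     continue
--                 res+=1#满足条件结果加一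
--                 visited[nextx][nexty]=True#将下一个点进行标记
--                 queue.append((nextx,nexty))#将下一个点加入队列中
--         return res#返回结果
--     res=bfs(visited,0,0,cnt)#进行BFS计算结果
--     return res#返回结果
-- ===== SOURCE B (Python) =====
-- def wardrobeFinishing(m: int, n: int, cnt: int) -> int:
--     # Row-by-row dynamic programming: a cell is reachable iff it is the origin,
--     # or its digit sum is within cnt and the cell above or to the left is reachable.
--     def digitsum(x, y):
--         s = 0
--         while x:
--             s += x % 10
--             x //= 10
--         while y:
--             s += y % 10
--             y //= 10
--         return s
--     total = 0
--     prev = []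
--     for i in range(m):
--         curr = []
--         for j in range(n):
--             r = (i == 0 and j == 0) or (digitsum(i, j) <= cnt and
--                  ((i > 0 and prev[j]) or (j > 0 and curr[j - 1])))
--             curr.append(r)
--             total += r
--         prev = curr
--     return total
-- ===== Notes on version B (the rewrite author's own statement) =====
-- stated objective: simpler
-- what changed: Replaced the DFS/queue over a full visited matrix by a row-by-row dynamic-programming pass that keeps only the previous row and counts reachable cells as they are computed.
import Mathlib
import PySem

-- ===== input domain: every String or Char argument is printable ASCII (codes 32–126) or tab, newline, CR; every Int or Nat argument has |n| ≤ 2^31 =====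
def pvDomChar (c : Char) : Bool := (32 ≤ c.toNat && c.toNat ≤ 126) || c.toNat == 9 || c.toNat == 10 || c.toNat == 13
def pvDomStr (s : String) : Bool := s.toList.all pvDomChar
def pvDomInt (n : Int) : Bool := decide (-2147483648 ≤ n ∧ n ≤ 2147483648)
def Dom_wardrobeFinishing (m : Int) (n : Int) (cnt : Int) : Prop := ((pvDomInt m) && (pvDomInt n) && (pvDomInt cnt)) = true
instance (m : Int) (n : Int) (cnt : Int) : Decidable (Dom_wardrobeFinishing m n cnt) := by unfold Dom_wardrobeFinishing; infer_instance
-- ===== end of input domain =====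

-- B replaces A's DFS/queue over a full visited matrix by a row-by-row dynamic-programming
-- pass keeping only the previous row (objective: simpler).

-- Shared helper: both Pythons contain the identical digit-sum loop
-- (`while x != 0: s += x % 10; x = x // 10`, then the same for y).
-- The loop guard `x ≠ 0` is rendered as `0 < x`: within both programs the helper is only
-- called with nonnegative arguments, where the two guards agree (for x < 0 Python diverges).
def pyDigitLoop (x s : Int) : Int :=
  if h : 0 < x then pyDigitLoop (PySem.Int.floordiv x 10) (s + PySem.Int.mod x 10) else s
termination_by x.toNat
decreasing_by
  have h10 : PySem.Int.floordiv x 10 = x / 10 := PySem.Int.floordiv_eq_ediv_of_pos (by omega)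
  have : x / 10 < x := by omega
  have h0 : 0 ≤ x / 10 := by positivity
  omega

def pyDigit (x y : Int) : Int := pyDigitLoop y (pyDigitLoop x 0)

-- ===== PORT A =====
-- Python lists have O(1) indexing/append/pop, so the mutable state (visited, queue) is held
-- in Arrays; the proofs relate them to plain lists via toList.
-- visited[i][j] read/write; indices are nonnegative and in range when these are evaluated
-- (the bounds test precedes them), so `toNat`/`getD`/`setIfInBounds` are exact there.
def vget (v : Array (Array Bool)) (i j : Int) : Bool := (v.getD i.toNat #[]).getD j.toNat false

def vset (v : Array (Array Bool)) (i j : Int) : Array (Array Bool) :=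
  let row := v.getD i.toNat #[]
  let v' := v.setIfInBounds i.toNat #[]  -- release the row's reference so the update is in place (same value)
  v'.setIfInBounds i.toNat (row.setIfInBounds j.toNat true)

-- one pass of the `for dx,dy in dir` body; state = (visited, queue, res)
def stepA (m n cnt : Int) (cur : Int × Int)
    (st : Array (Array Bool) × Array (Int × Int) × Int) (d : Int × Int) :
    Array (Array Bool) × Array (Int × Int) × Int :=
  let nextx := cur.1 + d.1
  let nexty := cur.2 + d.2
  if nextx < 0 ∨ m ≤ nextx ∨ nexty < 0 ∨ n ≤ nexty then st
  else if vget st.1 nextx nexty then st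
  else if cnt < pyDigit nextx nexty then st
  else (vset st.1 nextx nexty, st.2.1.push (nextx, nexty), st.2.2 + 1)

-- `while queue:` — queue.pop() takes the LAST element; fuel only makes the loop total
-- (2*m*n steps are proved sufficient below), the branch `0 => res` is never reached on Pre_.
def bfsLoopA (m n cnt : Int) :
    Nat → Array (Array Bool) → Array (Int × Int) → Int → Int
  | 0, _, _, res => res
  | fuel + 1, visited, queue, res =>
    match queue.back? with
    | none => res
    | some cur =>
      let st := [((0 : Int), (1 : Int)), ((1 : Int), (0 : Int))].foldl
        (stepA m n cnt cur) (visited, queue.pop, res)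
      bfsLoopA m n cnt fuel st.1 st.2.1 st.2.2

def wardrobeFinishing (m : Int) (n : Int) (cnt : Int) : Int :=
  let visited := ((PySem.List.pyRange 0 m 1).map
    (fun _ => ((PySem.List.pyRange 0 n 1).map (fun _ => false)).toArray)).toArray
  -- bfs: queue=[(0,0)], visited[0][0]=True, res=1  (Python raises IndexError when m ≤ 0 or n ≤ 0; Pre_ excludes that)
  bfsLoopA m n cnt (2 * (m.toNat * n.toNat)) (vset visited 0 0) #[((0 : Int), (0 : Int))] 1

-- ===== PORT B =====
def wardrobeFinishing_alt (m : Int) (n : Int) (cnt : Int) : Int :=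
  -- prev[j] / curr[j-1] are only consulted when i > 0 / j > 0, where they are in range, so getD is exact
  let fin := (PySem.List.pyRange 0 m 1).foldl
    (fun (st : Int × Array Bool) i =>
      let inner := (PySem.List.pyRange 0 n 1).foldl
        (fun (st2 : Array Bool × Int) j =>
          let r : Bool := decide (i = 0 ∧ j = 0) ||
            (decide (pyDigit i j ≤ cnt) &&
              ((decide (0 < i) && st.2.getD j.toNat false) ||
               (decide (0 < j) && st2.1.getD (j - 1).toNat false)))
          (st2.1.push r, st2.2 + if r then 1 else 0))
        (#[], st.1)
      (inner.2, inner.1))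
    (0, #[])
  fin.1

-- ===== PRECONDITION & SPEC =====
-- Pre_ excludes exactly the empty grids m ≤ 0 or n ≤ 0, on which Python A raises IndexError.
def Pre_wardrobeFinishing (m : Int) (n : Int) (cnt : Int) : Prop := 1 ≤ m ∧ 1 ≤ n
instance (m : Int) (n : Int) (cnt : Int) : Decidable (Pre_wardrobeFinishing m n cnt) := by
  unfold Pre_wardrobeFinishing; infer_instance

def pvWitness_wardrobeFinishing : Int × Int × Int := (3, 4, 2)

def Spec_wardrobeFinishing (m : Int) (n : Int) (cnt : Int) (out : Int) : Prop :=
  out = wardrobeFinishing_alt m n cnt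
instance (m : Int) (n : Int) (cnt : Int) (out : Int) : Decidable (Spec_wardrobeFinishing m n cnt out) := by
  unfold Spec_wardrobeFinishing; infer_instance

-- ===== CLAIM (what is proved, stated in full; the proofs are below) =====
def Claim_equal_wardrobeFinishing : Prop := ∀ (m : Int) (n : Int) (cnt : Int), Dom_wardrobeFinishing m n cnt → Pre_wardrobeFinishing m n cnt → Spec_wardrobeFinishing m n cnt (wardrobeFinishing m n cnt)

-- ===== LEMMAS AND PROOFS =====

-- Reachability by right/down moves, the common mathematical content of both programs.
def reachF (m n cnt : Int) (i j : Nat) : Bool :=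
  if i = 0 ∧ j = 0 then true
  else
    decide ((i : Int) < m) && decide ((j : Int) < n) &&
    decide (pyDigit (i : Int) (j : Int) ≤ cnt) &&
    ((if _h1 : 0 < i then reachF m n cnt (i - 1) j else false) ||
     (if _h2 : 0 < j then reachF m n cnt i (j - 1) else false))
termination_by i + j
decreasing_by all_goals omega

-- the common value: number of reachable cells in the grid
def nTotal (m n cnt : Int) : Nat :=
  ((List.range m.toNat).map
    (fun i => (List.range n.toNat).countP (fun j => reachF m n cnt i j))).sum

-- list-level model of the BFS state (the port's Arrays, seen through toList)
def vgetL (v : List (List Bool)) (i j : Int) : Bool := (v.getD i.toNat []).getD j.toNat false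

def vsetL (v : List (List Bool)) (i j : Int) : List (List Bool) :=
  v.set i.toNat ((v.getD i.toNat []).set j.toNat true)

def stepAL (m n cnt : Int) (cur : Int × Int)
    (st : List (List Bool) × List (Int × Int) × Int) (d : Int × Int) :
    List (List Bool) × List (Int × Int) × Int :=
  let nextx := cur.1 + d.1
  let nexty := cur.2 + d.2
  if nextx < 0 ∨ m ≤ nextx ∨ nexty < 0 ∨ n ≤ nexty then st
  else if vgetL st.1 nextx nexty then st
  else if cnt < pyDigit nextx nexty then st
  else (vsetL st.1 nextx nexty, st.2.1 ++ [(nextx, nexty)], st.2.2 + 1)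

def bfsLoopAL (m n cnt : Int) :
    Nat → List (List Bool) → List (Int × Int) → Int → Int
  | 0, _, _, res => res
  | fuel + 1, visited, queue, res =>
    match queue.getLast? with
    | none => res
    | some cur =>
      let st := [((0 : Int), (1 : Int)), ((1 : Int), (0 : Int))].foldl
        (stepAL m n cnt cur) (visited, queue.dropLast, res)
      bfsLoopAL m n cnt fuel st.1 st.2.1 st.2.2

-- bridges: the Array-state port projects to the list-level model
def projV (v : Array (Array Bool)) : List (List Bool) := v.toList.map Array.toList

lemma arrGetD_toList {α : Type} (a : Array α) (i : Nat) (d : α) :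
    a.getD i d = a.toList.getD i d := by
  unfold Array.getD
  rw [List.getD_eq_getElem?_getD]
  split
  · next h => rw [List.getElem?_eq_getElem (by simpa using h)]; simp
  · next h => rw [List.getElem?_eq_none (by simpa using h)]; rfl

lemma projV_getD (v : Array (Array Bool)) (a : Nat) :
    (projV v).getD a [] = (v.getD a #[]).toList := by
  rw [arrGetD_toList, projV, List.getD_eq_getElem?_getD, List.getD_eq_getElem?_getD,
    List.getElem?_map]
  cases v.toList[a]? <;> simp

lemma vget_bridge (v : Array (Array Bool)) (i j : Int) :
    vget v i j = vgetL (projV v) i j := by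
  unfold vget vgetL
  rw [projV_getD, arrGetD_toList]

lemma vset_bridge (v : Array (Array Bool)) (i j : Int) :
    projV (vset v i j) = vsetL (projV v) i j := by
  unfold vset vsetL
  simp only [projV, Array.toList_setIfInBounds, List.map_set, List.set_set,
    Array.toList_setIfInBounds]
  rw [← projV, projV_getD, arrGetD_toList]

lemma stepA_bridge (m n cnt : Int) (cur : Int × Int)
    (st : Array (Array Bool) × Array (Int × Int) × Int) (d : Int × Int) :
    (projV (stepA m n cnt cur st d).1, (stepA m n cnt cur st d).2.1.toList,
      (stepA m n cnt cur st d).2.2)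
      = stepAL m n cnt cur (projV st.1, st.2.1.toList, st.2.2) d := by
  unfold stepA stepAL
  simp only [vget_bridge]
  split_ifs <;> simp [vset_bridge, Array.toList_push]

lemma bfsLoopA_bridge (m n cnt : Int) :
    ∀ (fuel : Nat) (v : Array (Array Bool)) (q : Array (Int × Int)) (res : Int),
      bfsLoopA m n cnt fuel v q res = bfsLoopAL m n cnt fuel (projV v) q.toList res := by
  intro fuel
  induction fuel with
  | zero => intro v q res; rfl
  | succ fuel ih =>
    intro v q res
    rw [bfsLoopA, bfsLoopAL, ← Array.getLast?_toList]
    cases hb : q.toList.getLast? with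
    | none => rfl
    | some cur =>
      simp only []
      rw [ih]
      have hfold : ∀ (ds : List (Int × Int)) (st : Array (Array Bool) × Array (Int × Int) × Int),
          (projV (ds.foldl (stepA m n cnt cur) st).1,
           (ds.foldl (stepA m n cnt cur) st).2.1.toList,
           (ds.foldl (stepA m n cnt cur) st).2.2)
          = ds.foldl (stepAL m n cnt cur) (projV st.1, st.2.1.toList, st.2.2) := by
        intro ds
        induction ds with
        | nil => intro st; rfl
        | cons d ds ihd =>
          intro st
          simp only [List.foldl_cons]
          rw [ihd, stepA_bridge]
      have h1 := congrArg (fun p => p.1) (hfold [((0:Int),(1:Int)), ((1:Int),(0:Int))] (v, q.pop, res))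
      have h21 := congrArg (fun p => p.2.1) (hfold [((0:Int),(1:Int)), ((1:Int),(0:Int))] (v, q.pop, res))
      have h22 := congrArg (fun p => p.2.2) (hfold [((0:Int),(1:Int)), ((1:Int),(0:Int))] (v, q.pop, res))
      simp only [] at h1 h21 h22
      rw [h1, h21, h22, Array.toList_pop]

lemma getD_map_range_lt (f : Nat → Bool) (nn k : Nat) (h : k < nn) (d : Bool) :
    (((List.range nn).map f).getD k d) = f k := by
  rw [List.getD_eq_getElem?_getD]
  simp [List.getElem?_map, List.getElem?_range h]

lemma rowB_fold (m n cnt : Int) (i : Nat) (prev : List Bool) (t : Int)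
    (hprev : 0 < i → prev = (List.range n.toNat).map (fun j => reachF m n cnt (i-1) j))
    (him : (i:Int) < m) :
    ∀ k, k ≤ n.toNat →
    (List.range k).foldl
      (fun (st2 : List Bool × Int) (jN : Nat) =>
        let r : Bool := decide ((i:Int) = 0 ∧ (jN:Int) = 0) ||
            (decide (pyDigit (i:Int) (jN:Int) ≤ cnt) &&
              ((decide ((0:Int) < (i:Int)) && prev.getD (jN:Int).toNat false) ||
               (decide ((0:Int) < (jN:Int)) && st2.1.getD ((jN:Int) - 1).toNat false)))
        (st2.1 ++ [r], st2.2 + if r then 1 else 0)) ([], t)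
      = ((List.range k).map (fun j => reachF m n cnt i j),
         t + (((List.range k).countP (fun j => reachF m n cnt i j) : Nat) : Int)) := by
  intro k hk
  induction k with
  | zero => simp
  | succ k ih =>
    rw [List.range_succ, List.foldl_append, ih (by omega), List.foldl_cons, List.foldl_nil]
    have hkn : (k:Int) < n := by omega
    have hup : (decide ((0:Int) < (i:Int)) && prev.getD ((k:Int)).toNat false)
         = (if _h1 : 0 < i then reachF m n cnt (i-1) k else false) := by
      by_cases hi0 : 0 < i
      · rw [dif_pos hi0, hprev hi0, Int.toNat_natCast, getD_map_range_lt _ _ _ (by omega)]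
        have h' : (0:Int) < (i:Int) := by exact_mod_cast hi0
        simp only [h', decide_true, Bool.true_and]
      · rw [dif_neg hi0]
        have h' : ¬ (0:Int) < (i:Int) := by exact_mod_cast hi0
        simp only [h', decide_false, Bool.false_and]
    have hleft : (decide ((0:Int) < (k:Int)) &&
          ((List.range k).map (fun j => reachF m n cnt i j)).getD ((k:Int) - 1).toNat false)
          = (if _h2 : 0 < k then reachF m n cnt i (k-1) else false) := by
      by_cases hj0 : 0 < k
      · have hc : ((k:Int) - 1).toNat = k - 1 := by omega
        rw [dif_pos hj0, hc, getD_map_range_lt _ _ _ (by omega)]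
        have h' : (0:Int) < (k:Int) := by exact_mod_cast hj0
        simp only [h', decide_true, Bool.true_and]
      · rw [dif_neg hj0]
        have h' : ¬ (0:Int) < (k:Int) := by exact_mod_cast hj0
        simp only [h', decide_false, Bool.false_and]
    have hr : (decide ((i:Int) = 0 ∧ (k:Int) = 0) ||
            (decide (pyDigit (i:Int) (k:Int) ≤ cnt) &&
              ((decide ((0:Int) < (i:Int)) && prev.getD (k:Int).toNat false) ||
               (decide ((0:Int) < (k:Int)) &&
                 (((List.range k).map (fun j => reachF m n cnt i j)).getD ((k:Int) - 1).toNat false)))))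
          = reachF m n cnt i k := by
      rw [reachF]
      by_cases h00 : i = 0 ∧ k = 0
      · simp [h00.1, h00.2]
      · have hni : decide ((i:Int) = 0 ∧ (k:Int) = 0) = false := by
          apply decide_eq_false
          intro hc; exact h00 ⟨by exact_mod_cast hc.1, by exact_mod_cast hc.2⟩
        have hb1 : decide ((i:Int) < m) = true := by simp [him]
        have hb2 : decide ((k:Int) < n) = true := by simp [hkn]
        rw [if_neg h00, hni, Bool.false_or, hb1, hb2, hup, hleft]
        simp only [Bool.true_and]
    simp only [hr]
    rw [Prod.mk.injEq]
    refine ⟨by simp, ?_⟩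
    rw [List.countP_append]
    cases h : reachF m n cnt i k <;> simp [h] <;> push_cast <;> ring

lemma outerB_fold (m n cnt : Int) (hm : 1 ≤ m) (hn : 1 ≤ n) :
    ∀ k, k ≤ m.toNat →
    (List.range k).foldl
      (fun (st : Int × List Bool) (iN : Nat) =>
        let inner := (List.range n.toNat).foldl
          (fun (st2 : List Bool × Int) (jN : Nat) =>
            let r : Bool := decide ((iN:Int) = 0 ∧ (jN:Int) = 0) ||
                (decide (pyDigit (iN:Int) (jN:Int) ≤ cnt) &&
                  ((decide ((0:Int) < (iN:Int)) && st.2.getD (jN:Int).toNat false) ||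
                   (decide ((0:Int) < (jN:Int)) && st2.1.getD ((jN:Int) - 1).toNat false)))
            (st2.1 ++ [r], st2.2 + if r then 1 else 0))
          ([], st.1)
        (inner.2, inner.1)) (0, [])
      = (((((List.range k).map
             (fun i => (List.range n.toNat).countP (fun j => reachF m n cnt i j))).sum : Nat) : Int),
         if k = 0 then ([] : List Bool)
         else (List.range n.toNat).map (fun j => reachF m n cnt (k-1) j)) := by
  intro k hk
  induction k with
  | zero => simp
  | succ k ih =>
    rw [List.range_succ, List.foldl_append, ih (by omega), List.foldl_cons, List.foldl_nil]
    have hprev : 0 < k →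
        (if k = 0 then ([] : List Bool)
         else (List.range n.toNat).map (fun j => reachF m n cnt (k-1) j))
        = (List.range n.toNat).map (fun j => reachF m n cnt (k-1) j) := by
      intro h; rw [if_neg (by omega)]
    simp only []
    rw [rowB_fold m n cnt k _ _ (fun h => hprev h) (by omega) n.toNat (le_refl _)]
    rw [Prod.mk.injEq]
    constructor
    · rw [List.map_append, List.sum_append]
      push_cast; simp
    · rw [if_neg (by omega)]
      simp

-- list-level model of B's fold (the port's Arrays, seen through toList)
def altL (m n cnt : Int) : Int :=
  let fin := (PySem.List.pyRange 0 m 1).foldl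
    (fun (st : Int × List Bool) i =>
      let inner := (PySem.List.pyRange 0 n 1).foldl
        (fun (st2 : List Bool × Int) j =>
          let r : Bool := decide (i = 0 ∧ j = 0) ||
            (decide (pyDigit i j ≤ cnt) &&
              ((decide (0 < i) && st.2.getD j.toNat false) ||
               (decide (0 < j) && st2.1.getD (j - 1).toNat false)))
          (st2.1 ++ [r], st2.2 + if r then 1 else 0))
        ([], st.1)
      (inner.2, inner.1))
    (0, [])
  fin.1

lemma innerB_bridge (n cnt : Int) (i : Int) (prevA : Array Bool) :
    ∀ (l2 : List Int) (accA : Array Bool) (t : Int),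
      ((l2.foldl (fun (st2 : Array Bool × Int) j =>
          let r : Bool := decide (i = 0 ∧ j = 0) ||
            (decide (pyDigit i j ≤ cnt) &&
              ((decide (0 < i) && prevA.getD j.toNat false) ||
               (decide (0 < j) && st2.1.getD (j - 1).toNat false)))
          (st2.1.push r, st2.2 + if r then 1 else 0)) (accA, t)).1.toList,
       (l2.foldl (fun (st2 : Array Bool × Int) j =>
          let r : Bool := decide (i = 0 ∧ j = 0) ||
            (decide (pyDigit i j ≤ cnt) &&
              ((decide (0 < i) && prevA.getD j.toNat false) ||
               (decide (0 < j) && st2.1.getD (j - 1).toNat false)))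
          (st2.1.push r, st2.2 + if r then 1 else 0)) (accA, t)).2)
      = l2.foldl (fun (st2 : List Bool × Int) j =>
          let r : Bool := decide (i = 0 ∧ j = 0) ||
            (decide (pyDigit i j ≤ cnt) &&
              ((decide (0 < i) && prevA.toList.getD j.toNat false) ||
               (decide (0 < j) && st2.1.getD (j - 1).toNat false)))
          (st2.1 ++ [r], st2.2 + if r then 1 else 0)) (accA.toList, t) := by
  intro l2
  induction l2 with
  | nil => intro accA t; rfl
  | cons j l2 ihl =>
    intro accA t
    simp only [List.foldl_cons]
    rw [ihl]
    congr 1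
    simp only [arrGetD_toList, Array.toList_push]

lemma outerB_bridge (m n cnt : Int) :
    ∀ (l : List Int) (t : Int) (prevA : Array Bool),
      ((l.foldl (fun (st : Int × Array Bool) i =>
          let inner := (PySem.List.pyRange 0 n 1).foldl
            (fun (st2 : Array Bool × Int) j =>
              let r : Bool := decide (i = 0 ∧ j = 0) ||
                (decide (pyDigit i j ≤ cnt) &&
                  ((decide (0 < i) && st.2.getD j.toNat false) ||
                   (decide (0 < j) && st2.1.getD (j - 1).toNat false)))
              (st2.1.push r, st2.2 + if r then 1 else 0))
            (#[], st.1)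
          (inner.2, inner.1)) (t, prevA)).1,
       (l.foldl (fun (st : Int × Array Bool) i =>
          let inner := (PySem.List.pyRange 0 n 1).foldl
            (fun (st2 : Array Bool × Int) j =>
              let r : Bool := decide (i = 0 ∧ j = 0) ||
                (decide (pyDigit i j ≤ cnt) &&
                  ((decide (0 < i) && st.2.getD j.toNat false) ||
                   (decide (0 < j) && st2.1.getD (j - 1).toNat false)))
              (st2.1.push r, st2.2 + if r then 1 else 0))
            (#[], st.1)
          (inner.2, inner.1)) (t, prevA)).2.toList)
      = l.foldl (fun (st : Int × List Bool) i =>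
          let inner := (PySem.List.pyRange 0 n 1).foldl
            (fun (st2 : List Bool × Int) j =>
              let r : Bool := decide (i = 0 ∧ j = 0) ||
                (decide (pyDigit i j ≤ cnt) &&
                  ((decide (0 < i) && st.2.getD j.toNat false) ||
                   (decide (0 < j) && st2.1.getD (j - 1).toNat false)))
              (st2.1 ++ [r], st2.2 + if r then 1 else 0))
            ([], st.1)
          (inner.2, inner.1)) (t, prevA.toList) := by
  intro l
  induction l with
  | nil => intro t prevA; rfl
  | cons i l ihl =>
    intro t prevA
    simp only [List.foldl_cons]
    have hin := innerB_bridge n cnt i prevA (PySem.List.pyRange 0 n 1) #[] t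
    rw [ihl]
    congr 1
    have h1 := congrArg Prod.fst hin
    have h2 := congrArg Prod.snd hin
    simp only [] at h1 h2
    rw [Prod.mk.injEq]
    exact ⟨h2, h1⟩

lemma alt_bridge (m n cnt : Int) : wardrobeFinishing_alt m n cnt = altL m n cnt := by
  unfold wardrobeFinishing_alt altL
  simp only []
  have := congrArg (fun p => p.1) (outerB_bridge m n cnt (PySem.List.pyRange 0 m 1) 0 #[])
  simpa using this

theorem wardrobeFinishing_alt_eq (m n cnt : Int) (hm : 1 ≤ m) (hn : 1 ≤ n) :
    wardrobeFinishing_alt m n cnt = (nTotal m n cnt : Int) := by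
  rw [alt_bridge]
  unfold altL nTotal
  rw [PySem.List.pyRange_one 0 m, PySem.List.pyRange_one 0 n]
  simp only [zero_add, sub_zero, List.foldl_map]
  rw [outerB_fold m n cnt hm hn m.toNat (le_refl _)]

-- ==== A-side toolbox ====
def markA (v : List (List Bool)) (a b : Nat) : Bool := (v.getD a []).getD b false

def msetA (v : List (List Bool)) (a b : Nat) : List (List Bool) :=
  v.set a ((v.getD a []).set b true)

def countTrue (v : List (List Bool)) : Nat := (v.map (fun r => r.count true)).sum

def dimsA (M N : Nat) (v : List (List Bool)) : Prop :=
  v.length = M ∧ ∀ r ∈ v, r.length = N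

lemma getD_set_self {α : Type} (l : List α) (i : Nat) (a : α) (d : α) (h : i < l.length) :
    (l.set i a).getD i d = a := by
  simp [List.getD_eq_getElem?_getD, List.getElem?_set, h]

lemma getD_set_ne {α : Type} (l : List α) (i j : Nat) (a : α) (d : α) (h : i ≠ j) :
    (l.set i a).getD j d = l.getD j d := by
  simp [List.getD_eq_getElem?_getD, List.getElem?_set, h]

lemma markA_lt (v : List (List Bool)) (a b : Nat) (h : markA v a b = true) :
    a < v.length ∧ b < (v.getD a []).length := by
  unfold markA at h
  by_cases ha : a < v.length
  · refine ⟨ha, ?_⟩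
    by_cases hb : b < (v.getD a []).length
    · exact hb
    · rw [List.getD_eq_default _ false (by omega)] at h; exact absurd h (by simp)
  · rw [List.getD_eq_default v [] (by omega)] at h
    simp at h
lemma markA_mset_self (v : List (List Bool)) (a b : Nat)
    (ha : a < v.length) (hb : b < (v.getD a []).length) :
    markA (msetA v a b) a b = true := by
  unfold markA msetA
  rw [getD_set_self _ _ _ _ ha, getD_set_self _ _ _ _ hb]

lemma markA_mset_ne (v : List (List Bool)) (x y a b : Nat) (h : ¬(a = x ∧ b = y)) :
    markA (msetA v x y) a b = markA v a b := by
  unfold markA msetA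
  by_cases hax : a = x
  · subst hax
    have hby : b ≠ y := fun hc => h ⟨rfl, hc⟩
    by_cases hx : a < v.length
    · rw [getD_set_self _ _ _ _ hx, getD_set_ne _ _ _ _ _ (fun hc => hby hc.symm)]
    · rw [List.set_eq_of_length_le (by omega)]
  · rw [getD_set_ne _ _ _ _ _ (fun hc => hax hc.symm)]

lemma markA_mset_mono (v : List (List Bool)) (x y a b : Nat) (h : markA v a b = true) :
    markA (msetA v x y) a b = true := by
  by_cases hc : a = x ∧ b = y
  · obtain ⟨rfl, rfl⟩ := hc
    have := markA_lt v a b h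
    exact markA_mset_self v a b this.1 this.2
  · rw [markA_mset_ne _ _ _ _ _ hc]; exact h

lemma count_set_true (l : List Bool) (j : Nat) (hj : j < l.length) (h : l.getD j false = false) :
    (l.set j true).count true = l.count true + 1 := by
  induction l generalizing j with
  | nil => simp at hj
  | cons x xs ih =>
    cases j with
    | zero =>
      have hx : x = false := by simpa using h
      subst hx
      simp [List.set_cons_zero, List.count_cons]
    | succ j =>
      simp only [List.set_cons_succ, List.count_cons]
      rw [ih j (by simpa using hj) (by simpa [List.getD] using h)]
      omega

lemma countTrue_mset (v : List (List Bool)) (a b : Nat)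
    (ha : a < v.length) (hb : b < (v.getD a []).length) (h : markA v a b = false) :
    countTrue (msetA v a b) = countTrue v + 1 := by
  unfold countTrue msetA
  induction v generalizing a with
  | nil => simp at ha
  | cons r rs ih =>
    cases a with
    | zero =>
      simp only [List.getD_cons_zero] at hb h ⊢
      unfold markA at h
      simp only [List.getD_cons_zero] at h
      simp only [List.set_cons_zero, List.map_cons, List.sum_cons]
      rw [count_set_true r b hb h]
      omega
    | succ a =>
      simp only [List.getD_cons_succ] at hb h ⊢
      unfold markA at h
      simp only [List.getD_cons_succ] at h
      simp only [List.set_cons_succ, List.map_cons, List.sum_cons]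
      rw [ih a (by simpa using ha) hb (by unfold markA; exact h)]
      omega

lemma countTrue_le (M N : Nat) (v : List (List Bool)) (hd : dimsA M N v) :
    countTrue v ≤ M * N := by
  obtain ⟨hl, hr⟩ := hd
  subst hl
  unfold countTrue
  induction v with
  | nil => simp
  | cons r rs ih =>
    simp only [List.map_cons, List.sum_cons, List.length_cons]
    have h1 : r.count true ≤ N := by
      rw [← hr r (by simp)]; exact List.count_le_length
    have h2 := ih (fun x hx => hr x (by simp [hx]))
    calc r.count true + (rs.map (fun r => r.count true)).sum ≤ N + rs.length * N := by omega
      _ = (rs.length + 1) * N := by ring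

lemma dims_mset (M N : Nat) (v : List (List Bool)) (a b : Nat) (hd : dimsA M N v)
    (ha : a < v.length) : dimsA M N (msetA v a b) := by
  obtain ⟨hl, hr⟩ := hd
  refine ⟨by simp [msetA, hl], ?_⟩
  intro r hrm
  rcases List.mem_or_eq_of_mem_set hrm with h | h
  · exact hr r h
  · subst h
    rw [List.length_set]
    have : v.getD a [] ∈ v := by
      rw [List.getD_eq_getElem _ _ ha]; exact List.getElem_mem ha
    exact hr _ this

lemma reachF_origin (m n cnt : Int) : reachF m n cnt 0 0 = true := by
  rw [reachF]; simp

lemma reachF_right (m n cnt : Int) (a b : Nat) (h : reachF m n cnt a b = true)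
    (hm : ((a:Nat):Int) < m) (hn : ((b+1:Nat):Int) < n)
    (hd : pyDigit (a:Int) ((b+1:Nat):Int) ≤ cnt) : reachF m n cnt a (b+1) = true := by
  rw [reachF]
  rw [if_neg (by omega)]
  have h2 : (if _h2 : 0 < b + 1 then reachF m n cnt a (b+1-1) else false) = true := by
    rw [dif_pos (by omega)]; simpa using h
  simp [hm, h2]
  refine ⟨⟨by push_cast at hn; exact hn, by push_cast at hd; exact hd⟩, Or.inr h⟩

lemma reachF_down (m n cnt : Int) (a b : Nat) (h : reachF m n cnt a b = true)
    (hm : ((a+1:Nat):Int) < m) (hn : ((b:Nat):Int) < n)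
    (hd : pyDigit ((a+1:Nat):Int) (b:Int) ≤ cnt) : reachF m n cnt (a+1) b = true := by
  rw [reachF]
  rw [if_neg (by omega)]
  have h1 : (if _h1 : 0 < a + 1 then reachF m n cnt (a+1-1) b else false) = true := by
    rw [dif_pos (by omega)]; simpa using h
  simp [hn, h1]
  refine ⟨⟨by push_cast at hm; exact hm, by push_cast at hd; exact hd⟩, Or.inl h⟩

-- the loop invariant of A's bfs; `exempt` lists popped-but-unprocessed cells (the current one)
def InvA (m n cnt : Int) (exempt : Option (Nat × Nat))
    (v : List (List Bool)) (q : List (Int × Int)) (res : Int) : Prop :=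
  dimsA m.toNat n.toNat v ∧
  markA v 0 0 = true ∧
  (∀ p ∈ q, ∃ a b : Nat, p = ((a:Int),(b:Int)) ∧ a < m.toNat ∧ b < n.toNat ∧ markA v a b = true) ∧
  (∀ a b : Nat, markA v a b = true → a < m.toNat ∧ b < n.toNat ∧ reachF m n cnt a b = true) ∧
  (∀ a b : Nat, markA v a b = true → ((a:Int),(b:Int)) ∉ q → exempt ≠ some (a, b) →
     (b+1 < n.toNat → pyDigit (a:Int) ((b+1:Nat):Int) ≤ cnt → markA v a (b+1) = true) ∧
     (a+1 < m.toNat → pyDigit ((a+1:Nat):Int) (b:Int) ≤ cnt → markA v (a+1) b = true)) ∧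
  res = (countTrue v : Int)

lemma stepA_eq (m n cnt : Int) (hm : 1 ≤ m) (hn : 1 ≤ n) (cur : Int × Int) (d : Int × Int)
    (st : List (List Bool) × List (Int × Int) × Int) (na nb : Nat)
    (hx : cur.1 + d.1 = (na:Int)) (hy : cur.2 + d.2 = (nb:Int))
    (hdim : dimsA m.toNat n.toNat st.1) :
    stepAL m n cnt cur st d =
      if na < m.toNat ∧ nb < n.toNat ∧ markA st.1 na nb = false ∧ pyDigit (na:Int) (nb:Int) ≤ cnt
      then (msetA st.1 na nb, st.2.1 ++ [((na:Int),(nb:Int))], st.2.2 + 1)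
      else st := by
  unfold stepAL
  rw [hx, hy]
  have hveq : vgetL st.1 (na:Int) (nb:Int) = markA st.1 na nb := by
    unfold vgetL markA; rw [Int.toNat_natCast, Int.toNat_natCast]
  by_cases hcond : na < m.toNat ∧ nb < n.toNat ∧ markA st.1 na nb = false ∧ pyDigit (na:Int) (nb:Int) ≤ cnt
  · rw [if_pos hcond]
    obtain ⟨h1, h2, h3, h4⟩ := hcond
    rw [if_neg (by omega)]
    rw [hveq, h3]
    simp only [Bool.false_eq_true, if_false]
    rw [if_neg (by omega)]
    unfold vsetL msetA
    rw [Int.toNat_natCast, Int.toNat_natCast]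
  · rw [if_neg hcond]
    by_cases hb : na < m.toNat ∧ nb < n.toNat
    · obtain ⟨hb1, hb2⟩ := hb
      rw [if_neg (by omega)]
      rw [hveq]
      by_cases hmk : markA st.1 na nb = true
      · rw [hmk]; simp
      · simp only [Bool.not_eq_true] at hmk
        rw [hmk]
        simp only [Bool.false_eq_true, if_false]
        rw [if_pos (by
          by_contra hcon
          exact hcond ⟨hb1, hb2, hmk, by omega⟩)]
    · have hor : ¬ na < m.toNat ∨ ¬ nb < n.toNat := by tauto
      rw [if_pos (by rcases hor with h | h <;> omega)]

lemma step_inv (m n cnt : Int) (ca cb na nb : Nat)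
    (v : List (List Bool)) (q : List (Int × Int)) (res : Int)
    (hreach : reachF m n cnt ca cb = true → na < m.toNat → nb < n.toNat →
       pyDigit (na:Int) (nb:Int) ≤ cnt → reachF m n cnt na nb = true)
    (hInv : InvA m n cnt (some (ca, cb)) v q res)
    (hcm : markA v ca cb = true) :
    (let st' := if na < m.toNat ∧ nb < n.toNat ∧ markA v na nb = false ∧ pyDigit (na:Int) (nb:Int) ≤ cnt
                then (msetA v na nb, q ++ [((na:Int),(nb:Int))], res + 1)
                else (v, q, res)
     InvA m n cnt (some (ca, cb)) st'.1 st'.2.1 st'.2.2 ∧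
     (∀ a b : Nat, markA v a b = true → markA st'.1 a b = true) ∧
     (na < m.toNat → nb < n.toNat → pyDigit (na:Int) (nb:Int) ≤ cnt → markA st'.1 na nb = true) ∧
     2*(m.toNat*n.toNat - countTrue st'.1) + st'.2.1.length ≤
       2*(m.toNat*n.toNat - countTrue v) + q.length) := by
  obtain ⟨hdim, horig, hq, hsound, hproc, hres⟩ := hInv
  by_cases hcond : na < m.toNat ∧ nb < n.toNat ∧ markA v na nb = false ∧ pyDigit (na:Int) (nb:Int) ≤ cnt
  · obtain ⟨h1, h2, h3, h4⟩ := hcond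
    simp only [if_pos (show na < m.toNat ∧ nb < n.toNat ∧ markA v na nb = false ∧
      pyDigit (na:Int) (nb:Int) ≤ cnt from ⟨h1, h2, h3, h4⟩)]
    have hva : na < v.length := by rw [hdim.1]; exact h1
    have hrowmem : v.getD na [] ∈ v := by
      rw [List.getD_eq_getElem _ _ hva]; exact List.getElem_mem hva
    have hvb : nb < (v.getD na []).length := by rw [hdim.2 _ hrowmem]; exact h2
    have hdims' : dimsA m.toNat n.toNat (msetA v na nb) := dims_mset _ _ _ _ _ hdim hva
    have hct : countTrue (msetA v na nb) = countTrue v + 1 := countTrue_mset v na nb hva hvb h3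
    have hself : markA (msetA v na nb) na nb = true := markA_mset_self v na nb hva hvb
    have hreach' : reachF m n cnt na nb = true :=
      hreach (hsound ca cb hcm).2.2 h1 h2 h4
    refine ⟨⟨hdims', markA_mset_mono _ _ _ _ _ horig, ?_, ?_, ?_, ?_⟩,
      fun a b h => markA_mset_mono _ _ _ _ _ h, fun _ _ _ => hself, ?_⟩
    · intro p hp
      rcases List.mem_append.mp hp with h | h
      · obtain ⟨a, b, rfl, hA, hB, hC⟩ := hq p h
        exact ⟨a, b, rfl, hA, hB, markA_mset_mono _ _ _ _ _ hC⟩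
      · rw [List.mem_singleton] at h
        exact ⟨na, nb, h, h1, h2, hself⟩
    · intro a b hmk
      by_cases hab : a = na ∧ b = nb
      · obtain ⟨rfl, rfl⟩ := hab
        exact ⟨h1, h2, hreach'⟩
      · rw [markA_mset_ne _ _ _ _ _ hab] at hmk
        exact hsound a b hmk
    · intro a b hmk hnq hne
      by_cases hab : a = na ∧ b = nb
      · obtain ⟨rfl, rfl⟩ := hab
        exact absurd (List.mem_append.mpr (Or.inr (List.mem_singleton.mpr rfl))) hnq
      · rw [markA_mset_ne _ _ _ _ _ hab] at hmk
        have hnq' : ((a:Int), (b:Int)) ∉ q := fun hc => hnq (List.mem_append.mpr (Or.inl hc))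
        obtain ⟨hR, hD⟩ := hproc a b hmk hnq' hne
        exact ⟨fun hx hy => markA_mset_mono _ _ _ _ _ (hR hx hy),
               fun hx hy => markA_mset_mono _ _ _ _ _ (hD hx hy)⟩
    · rw [hct, hres]; push_cast; ring
    · have hle : countTrue (msetA v na nb) ≤ m.toNat * n.toNat := countTrue_le _ _ _ hdims'
      rw [hct]
      simp only [List.length_append, List.length_singleton]
      omega
  · simp only [if_neg hcond]
    refine ⟨⟨hdim, horig, hq, hsound, hproc, hres⟩, fun a b h => h, ?_, le_refl _⟩
    intro hna hnb hdg
    by_cases hmk : markA v na nb = true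
    · exact hmk
    · exact absurd ⟨hna, hnb, by simpa using hmk, hdg⟩ hcond

lemma iter_inv (m n cnt : Int) (hm : 1 ≤ m) (hn : 1 ≤ n)
    (v : List (List Bool)) (q : List (Int × Int)) (res : Int) (cur : Int × Int)
    (hInv : InvA m n cnt none v (q ++ [cur]) res) :
    (let st := [((0:Int),(1:Int)), ((1:Int),(0:Int))].foldl (stepAL m n cnt cur) (v, q, res)
     InvA m n cnt none st.1 st.2.1 st.2.2 ∧
     2*(m.toNat*n.toNat - countTrue st.1) + st.2.1.length <
       2*(m.toNat*n.toNat - countTrue v) + (q ++ [cur]).length) := by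
  obtain ⟨hdim, horig, hq, hsound, hproc, hres⟩ := hInv
  obtain ⟨ca, cb, hc, hca, hcb, hcm⟩ := hq cur (List.mem_append.mpr (Or.inr (List.mem_singleton.mpr rfl)))
  -- popped invariant: cur is exempt from the processed clause
  have hInv1 : InvA m n cnt (some (ca, cb)) v q res := by
    refine ⟨hdim, horig, ?_, hsound, ?_, hres⟩
    · intro p hp; exact hq p (List.mem_append.mpr (Or.inl hp))
    · intro a b hmk hnq hne
      refine hproc a b hmk ?_ (by simp)
      intro hmem
      rcases List.mem_append.mp hmem with h | h
      · exact hnq h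
      · rw [List.mem_singleton] at h
        have h2 : ((a:Int),(b:Int)) = ((ca:Int),(cb:Int)) := by rw [h, hc]
        have ha : a = ca := by have := congrArg Prod.fst h2; simp at this; omega
        have hb : b = cb := by have := congrArg Prod.snd h2; simp at this; omega
        exact hne (by rw [ha, hb])
  simp only [List.foldl_cons, List.foldl_nil]
  rw [stepA_eq m n cnt hm hn cur ((0:Int),(1:Int)) (v, q, res) ca (cb+1)
      (by rw [hc]; push_cast; ring) (by rw [hc]; push_cast; ring) hdim]
  have hstep1 := step_inv m n cnt ca cb ca (cb+1) v q res
    (fun h hna hnb hd => reachF_right m n cnt ca cb h (by push_cast; omega) (by push_cast; omega)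
      (by push_cast at hd ⊢; exact hd)) hInv1 hcm
  simp only [] at hstep1
  obtain ⟨hInvS1, hmono1, hdone1, hmu1⟩ := hstep1
  set st1 := (if ca < m.toNat ∧ cb + 1 < n.toNat ∧ markA v ca (cb+1) = false ∧
      pyDigit (ca:Int) ((cb+1:Nat):Int) ≤ cnt
    then (msetA v ca (cb+1), q ++ [((ca:Int),((cb+1:Nat):Int))], res + 1)
    else (v, q, res)) with hst1
  have hcm1 : markA st1.1 ca cb = true := hmono1 ca cb hcm
  rw [stepA_eq m n cnt hm hn cur ((1:Int),(0:Int)) st1 (ca+1) cb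
      (by rw [hc]; push_cast; ring) (by rw [hc]; push_cast; ring) (by exact hInvS1.1)]
  have hstep2 := step_inv m n cnt ca cb (ca+1) cb st1.1 st1.2.1 st1.2.2
    (fun h hna hnb hd => reachF_down m n cnt ca cb h (by push_cast; omega) (by push_cast; omega)
      (by push_cast at hd ⊢; exact hd))
    (by exact hInvS1) hcm1
  simp only [] at hstep2
  have hsteq : (st1.1, st1.2.1, st1.2.2) = st1 := rfl
  rw [hsteq] at hstep2
  obtain ⟨hInvS2, hmono2, hdone2, hmu2⟩ := hstep2
  refine ⟨?_, ?_⟩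
  · obtain ⟨d2, o2, q2, s2, p2, r2⟩ := hInvS2
    refine ⟨d2, o2, q2, s2, ?_, r2⟩
    intro a b hmk hnq _
    by_cases hab : a = ca ∧ b = cb
    · obtain ⟨rfl, rfl⟩ := hab
      constructor
      · intro hx hy
        exact hmono2 _ _ (hdone1 (by omega) hx hy)
      · intro hx hy
        exact hdone2 hx (by omega) hy
    · have hne2 : some ((ca:Nat), (cb:Nat)) ≠ some (a, b) := by
        intro hcon
        simp only [Option.some.injEq, Prod.mk.injEq] at hcon
        exact hab ⟨hcon.1.symm, hcon.2.symm⟩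
      exact p2 a b hmk hnq hne2
  · have hlen : (q ++ [cur]).length = q.length + 1 := by simp
    omega

lemma complete_of_closed (m n cnt : Int) (v : List (List Bool)) (res : Int)
    (hInv : InvA m n cnt none v [] res) :
    ∀ s a b : Nat, a + b ≤ s → a < m.toNat → b < n.toNat →
      reachF m n cnt a b = true → markA v a b = true := by
  obtain ⟨hdim, horig, hq, hsound, hproc, hres⟩ := hInv
  intro s
  induction s with
  | zero =>
    intro a b hs _ _ _
    have : a = 0 ∧ b = 0 := by omega
    rw [this.1, this.2]; exact horig
  | succ s ih =>
    intro a b hs ha hb hr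
    by_cases h00 : a = 0 ∧ b = 0
    · rw [h00.1, h00.2]; exact horig
    · rw [reachF, if_neg h00] at hr
      simp only [Bool.and_eq_true, Bool.or_eq_true, decide_eq_true_eq] at hr
      obtain ⟨⟨_, hdg⟩, hor⟩ := hr
      rcases hor with hup | hleft
      · have hauxa : 0 < a := by
          by_cases h : 0 < a
          · exact h
          · rw [dif_neg h] at hup; exact absurd hup (by simp)
        rw [dif_pos hauxa] at hup
        have hmkp : markA v (a-1) b = true :=
          ih (a-1) b (by omega) (by omega) hb hup
        have := (hproc (a-1) b hmkp (List.not_mem_nil) (by simp)).2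
        have heq : a - 1 + 1 = a := by omega
        rw [heq] at this
        exact this ha (by push_cast at hdg ⊢; exact hdg)
      · have hauxb : 0 < b := by
          by_cases h : 0 < b
          · exact h
          · rw [dif_neg h] at hleft; exact absurd hleft (by simp)
        rw [dif_pos hauxb] at hleft
        have hmkp : markA v a (b-1) = true :=
          ih a (b-1) (by omega) ha (by omega) hleft
        have := (hproc a (b-1) hmkp (List.not_mem_nil) (by simp)).1
        have heq : b - 1 + 1 = b := by omega
        rw [heq] at this
        exact this hb (by push_cast at hdg ⊢; exact hdg)

lemma countTrue_final (m n cnt : Int) (v : List (List Bool)) (res : Int)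
    (hInv : InvA m n cnt none v [] res) :
    countTrue v = nTotal m n cnt := by
  have hdim := hInv.1
  have hsound := hInv.2.2.2.1
  have hv : v = (List.range m.toNat).map
      (fun a => (List.range n.toNat).map (fun b => reachF m n cnt a b)) := by
    apply List.ext_getElem (by simp [hdim.1])
    intro i h1 h2
    have hiM : i < m.toNat := by simpa using h2
    apply List.ext_getElem
    · simp only [List.getElem_map, List.getElem_range, List.length_map, List.length_range]
      exact hdim.2 _ (List.getElem_mem h1)
    · intro j hj1 hj2
      have hjrow : j < v[i].length := hj1
      have hjN : j < n.toNat := by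
        have := hdim.2 _ (List.getElem_mem h1); omega
      have hbridge : v[i][j] = markA v i j := by
        unfold markA
        rw [List.getD_eq_getElem _ _ h1, List.getD_eq_getElem _ _ hjrow]
      simp only [List.getElem_map, List.getElem_range]
      rw [hbridge]
      cases hmk : markA v i j with
      | true => exact ((hsound i j hmk).2.2).symm
      | false =>
        by_cases hr : reachF m n cnt i j = true
        · have := complete_of_closed m n cnt v res hInv (i + j) i j (le_refl _) hiM hjN hr
          rw [this] at hmk
          exact absurd hmk (by simp)
        · rw [Bool.not_eq_true] at hr
          exact hr.symm
  rw [hv]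
  unfold countTrue nTotal
  rw [List.map_map]
  congr 1
  apply List.map_congr_left
  intro a _
  simp only [Function.comp_apply]
  rw [List.count_eq_countP]
  rw [List.countP_map]
  apply List.countP_congr
  intro b _
  simp

lemma bfs_run (m n cnt : Int) (hm : 1 ≤ m) (hn : 1 ≤ n) :
    ∀ (fuel : Nat) (v : List (List Bool)) (q : List (Int × Int)) (res : Int),
      InvA m n cnt none v q res →
      2*(m.toNat*n.toNat - countTrue v) + q.length ≤ fuel →
      bfsLoopAL m n cnt fuel v q res = (nTotal m n cnt : Int) := by
  intro fuel
  induction fuel with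
  | zero =>
    intro v q res hInv hmu
    have hq : q = [] := by
      have hlen : q.length = 0 := by omega
      exact List.length_eq_zero_iff.mp hlen
    subst hq
    rw [bfsLoopAL]
    rw [hInv.2.2.2.2.2, countTrue_final m n cnt v res hInv]
  | succ fuel ih =>
    intro v q res hInv hmu
    rw [bfsLoopAL]
    cases hql : q.getLast? with
    | none =>
      have hq : q = [] := List.getLast?_eq_none_iff.mp hql
      subst hq
      simp only []
      rw [hInv.2.2.2.2.2, countTrue_final m n cnt v res hInv]
    | some cur =>
      simp only []
      have hqe : q.dropLast ++ [cur] = q := List.dropLast_append_getLast? cur hql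
      have hiter := iter_inv m n cnt hm hn v q.dropLast res cur (by rw [hqe]; exact hInv)
      simp only [] at hiter
      exact ih _ _ _ hiter.1 (by rw [hqe] at hiter; omega)

lemma getD_all_false (l : List Bool) (h : ∀ x ∈ l, x = false) (b : Nat) :
    l.getD b false = false := by
  rw [List.getD_eq_getElem?_getD]
  cases hg : l[b]? with
  | none => rfl
  | some x =>
    have : x ∈ l := List.mem_of_getElem? hg
    simp [h x this]

lemma bfsL_init (m n cnt : Int) (hm : 1 ≤ m) (hn : 1 ≤ n) :
    bfsLoopAL m n cnt (2 * (m.toNat * n.toNat))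
      (vsetL ((PySem.List.pyRange 0 m 1).map
        (fun _ => (PySem.List.pyRange 0 n 1).map (fun _ => false))) 0 0)
      [((0 : Int), (0 : Int))] 1 = (nTotal m n cnt : Int) := by
  set grid := (PySem.List.pyRange 0 m 1).map
    (fun _ => (PySem.List.pyRange 0 n 1).map (fun _ => false)) with hgrid
  have hrowfalse : ∀ r ∈ grid, ∀ x ∈ r, x = false := by
    intro r hr x hx
    rw [hgrid] at hr
    obtain ⟨_, _, rfl⟩ := List.mem_map.mp hr
    obtain ⟨_, _, rfl⟩ := List.mem_map.mp hx
    rfl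
  have hdims0 : dimsA m.toNat n.toNat grid := by
    constructor
    · rw [hgrid]; simp [PySem.List.length_pyRange_one]
    · intro r hr
      rw [hgrid] at hr
      obtain ⟨_, _, rfl⟩ := List.mem_map.mp hr
      simp [PySem.List.length_pyRange_one]
  have hmark0 : ∀ a b : Nat, markA grid a b = false := by
    intro a b
    unfold markA
    by_cases ha : a < grid.length
    · have hrm : grid.getD a [] ∈ grid := by
        rw [List.getD_eq_getElem _ _ ha]; exact List.getElem_mem ha
      exact getD_all_false _ (hrowfalse _ hrm) b
    · rw [List.getD_eq_default grid [] (by omega)]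
      rfl
  have hct0 : countTrue grid = 0 := by
    unfold countTrue
    apply List.sum_eq_zero
    intro x hx
    obtain ⟨r, hr, rfl⟩ := List.mem_map.mp hx
    rw [List.count_eq_zero]
    intro hmem
    exact absurd (hrowfalse r hr true hmem) (by simp)
  have hglen : 0 < grid.length := by rw [hdims0.1]; omega
  have hrow0 : 0 < (grid.getD 0 []).length := by
    have hrm : grid.getD 0 [] ∈ grid := by
      rw [List.getD_eq_getElem _ _ hglen]; exact List.getElem_mem hglen
    rw [hdims0.2 _ hrm]; omega
  have hveq : vsetL grid 0 0 = msetA grid 0 0 := rfl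
  rw [hveq]
  have horig : markA (msetA grid 0 0) 0 0 = true := markA_mset_self grid 0 0 hglen hrow0
  have hInv0 : InvA m n cnt none (msetA grid 0 0) [((0:Int),(0:Int))] 1 := by
    refine ⟨dims_mset _ _ _ _ _ hdims0 hglen, horig, ?_, ?_, ?_, ?_⟩
    · intro p hp
      rw [List.mem_singleton] at hp
      exact ⟨0, 0, by simpa using hp, by omega, by omega, horig⟩
    · intro a b hmk
      by_cases hab : a = 0 ∧ b = 0
      · obtain ⟨rfl, rfl⟩ := hab
        exact ⟨by omega, by omega, reachF_origin m n cnt⟩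
      · rw [markA_mset_ne _ _ _ _ _ hab, hmark0 a b] at hmk
        exact absurd hmk (by simp)
    · intro a b hmk hnq _
      by_cases hab : a = 0 ∧ b = 0
      · obtain ⟨rfl, rfl⟩ := hab
        exact absurd (by simp) hnq
      · rw [markA_mset_ne _ _ _ _ _ hab, hmark0 a b] at hmk
        exact absurd hmk (by simp)
    · rw [countTrue_mset grid 0 0 hglen hrow0 (hmark0 0 0), hct0]
      norm_num
  apply bfs_run m n cnt hm hn _ _ _ _ hInv0
  rw [countTrue_mset grid 0 0 hglen hrow0 (hmark0 0 0), hct0]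
  simp only [List.length_singleton]
  have hmn : 1 ≤ m.toNat * n.toNat := by
    have h1 : 1 ≤ m.toNat := by omega
    have h2 : 1 ≤ n.toNat := by omega
    exact Nat.one_le_iff_ne_zero.mpr (by positivity)
  omega

theorem wardrobeFinishing_eq (m n cnt : Int) (hm : 1 ≤ m) (hn : 1 ≤ n) :
    wardrobeFinishing m n cnt = (nTotal m n cnt : Int) := by
  unfold wardrobeFinishing
  simp only []
  rw [bfsLoopA_bridge]
  have hproj : projV (vset (((PySem.List.pyRange 0 m 1).map
      (fun _ => ((PySem.List.pyRange 0 n 1).map (fun _ => false)).toArray)).toArray) 0 0)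
      = vsetL ((PySem.List.pyRange 0 m 1).map
        (fun _ => (PySem.List.pyRange 0 n 1).map (fun _ => false))) 0 0 := by
    rw [vset_bridge]
    congr 1
    simp [projV, List.map_map, Function.comp]
  rw [hproj]
  exact bfsL_init m n cnt hm hn

-- ===== VERDICT (by name: the statement is the Claim_ definition above) =====
theorem wardrobeFinishing_spec : Claim_equal_wardrobeFinishing := by
  intro m n cnt _ hpre
  unfold Spec_wardrobeFinishing
  rw [wardrobeFinishing_eq m n cnt hpre.1 hpre.2, wardrobeFinishing_alt_eq m n cnt hpre.1 hpre.2]
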